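-- pv_equiv track=rewrite | github.com/Harikrishnan200/LEETCODE-PROBLEMS | UST-SortProblem.py | min_operations_to_sort
-- ===== SOURCE A (Python) =====
-- def min_operations_to_sort(arr):
--     count = 0
--
--     while arr != sorted(arr):  # Keep doing operations until the array is sorted
--         for i in range(len(arr) - 1):
--             if arr[i] > arr[i + 1]:
--                 arr.pop(i + 1)
--                 count += 1
--                 break
--
--     return count
-- ===== SOURCE B (Python) =====
-- def min_operations_to_sort(arr):
--     # Single left-to-right pass: keep the last kept element; every element
--     # smaller than it must be removed. (Does not mutate arr, unlike A.)
--     if not arr: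
--         return 0
--     count = 0
--     last = arr[0]
--     for x in arr[1:]:
--         if x < last:
--             count += 1
--         else:
--             last = x
--     return count
-- ===== Notes on version B (the rewrite author's own statement) =====
-- stated objective: faster
-- what changed: Replaced the repeated sort-and-scan-and-pop loop (re-sorting the array after every single removal) by one linear pass that tracks the last kept element and counts every element smaller than it.
import Mathlib
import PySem

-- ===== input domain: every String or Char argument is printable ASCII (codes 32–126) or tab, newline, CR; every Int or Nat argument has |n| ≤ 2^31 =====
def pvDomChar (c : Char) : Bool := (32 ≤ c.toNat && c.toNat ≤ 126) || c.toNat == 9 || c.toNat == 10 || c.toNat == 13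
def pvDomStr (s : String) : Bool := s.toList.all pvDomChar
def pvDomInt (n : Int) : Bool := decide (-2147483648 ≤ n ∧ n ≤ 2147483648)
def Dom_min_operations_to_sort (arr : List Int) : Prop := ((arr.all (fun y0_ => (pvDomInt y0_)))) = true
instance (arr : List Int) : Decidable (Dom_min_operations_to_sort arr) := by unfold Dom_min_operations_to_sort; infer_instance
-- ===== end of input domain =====

-- B replaces A's repeated sort-compare-and-pop loop by one linear pass tracking the
-- last kept element (objective: faster). A mutates its argument in place (pops
-- elements); B does not — the equivalence proved here is about the return value only.

-- ===== PORT A =====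
-- inner 'for i in range(len(arr)-1): if arr[i] > arr[i+1]: arr.pop(i+1); break':
-- scan for the first adjacent descent; 'some arr'' = a pop happened, none = the loop fell through.
def pvPopFirst (xs : List Int) : Option (List Int) :=
  match xs with
  | a :: b :: rest =>
      if a > b then some (a :: rest)
      else (pvPopFirst (b :: rest)).map (fun l => a :: l)
  | _ => none

theorem pvPopFirst_length : ∀ (xs l : List Int), pvPopFirst xs = some l → l.length < xs.length := by
  intro xs
  induction xs with
  | nil => intro l h; simp [pvPopFirst] at h
  | cons a t ih =>
    intro l h
    match t with
    | [] => simp [pvPopFirst] at h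
    | b :: rest =>
      simp only [pvPopFirst] at h
      split at h
      · cases h; simp
      · simp only [Option.map_eq_some_iff] at h
        obtain ⟨l', hl', rfl⟩ := h
        have := ih l' hl'
        simpa using Nat.succ_lt_succ this

-- 'while arr != sorted(arr): …' with the running count
def pvLoopA (arr : List Int) (count : Int) : Int :=
  if arr = PySem.List.sorted arr (fun x => x) false then count
  else
    match h : pvPopFirst arr with
    | some arr' => pvLoopA arr' (count + 1)
    | none => count    -- unreachable: an unsorted list always has an adjacent descent
termination_by arr.length
decreasing_by exact pvPopFirst_length _ _ h

def min_operations_to_sort (arr : List Int) : Int := pvLoopA arr 0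

-- ===== PORT B =====
-- single pass: 'last' = last kept element, count every x < last
def pvGoB (last : Int) (xs : List Int) : Int :=
  match xs with
  | [] => 0
  | x :: rest => if x < last then 1 + pvGoB last rest else pvGoB x rest

def min_operations_to_sort_alt (arr : List Int) : Int :=
  match arr with
  | [] => 0
  | x :: rest => pvGoB x rest

-- ===== PRECONDITION & SPEC =====
def Spec_min_operations_to_sort (arr : List Int) (out : Int) : Prop := out = min_operations_to_sort_alt arr
instance (arr : List Int) (out : Int) : Decidable (Spec_min_operations_to_sort arr out) := by unfold Spec_min_operations_to_sort; infer_instance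

-- ===== CLAIM (what is proved, stated in full; the proofs are below) =====
def Claim_equal_min_operations_to_sort : Prop := ∀ (arr : List Int), Dom_min_operations_to_sort arr → Spec_min_operations_to_sort arr (min_operations_to_sort arr)

-- ===== LEMMAS AND PROOFS =====

-- A's while-condition 'arr != sorted(arr)' characterised: equality with the sort = nondecreasing
theorem pv_sorted_iff (xs : List Int) :
    xs = PySem.List.sorted xs (fun x => x) false ↔ List.Pairwise (· ≤ ·) xs := by
  constructor
  · intro h
    have := PySem.List.sorted_pairwise (xs := xs) (key := fun x => x)
    rw [← h] at this
    simpa using this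
  · intro h
    exact (PySem.List.sorted_eq_self_of_pairwise xs (fun x => x) (by simpa using h)).symm

theorem pvGoB_sorted : ∀ (xs : List Int) (last : Int),
    (∀ x ∈ xs, last ≤ x) → List.Pairwise (· ≤ ·) xs → pvGoB last xs = 0 := by
  intro xs
  induction xs with
  | nil => intro last _ _; rfl
  | cons x rest ih =>
    intro last hle hp
    have hx : last ≤ x := hle x (by simp)
    rw [List.pairwise_cons] at hp
    simp only [pvGoB, if_neg (not_lt.mpr hx)]
    exact ih x hp.1 hp.2

theorem pvPopFirst_head (a : Int) (xs l : List Int) (h : pvPopFirst (a :: xs) = some l) :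
    ∃ t, l = a :: t := by
  match xs with
  | [] => simp [pvPopFirst] at h
  | b :: rest =>
    simp only [pvPopFirst] at h
    split at h
    · exact ⟨_, (Option.some.injEq _ _).mp h |>.symm⟩
    · simp only [Option.map_eq_some_iff] at h
      obtain ⟨l', _, rfl⟩ := h
      exact ⟨l', rfl⟩

theorem pv_pop_step : ∀ (xs : List Int), ¬ List.Pairwise (· ≤ ·) xs →
    ∃ l, pvPopFirst xs = some l ∧
      min_operations_to_sort_alt xs = 1 + min_operations_to_sort_alt l := by
  intro xs
  induction xs with
  | nil => intro h; exact absurd List.Pairwise.nil h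
  | cons a t ih =>
    intro h
    match t with
    | [] => exact absurd (by simp) h
    | b :: rest =>
      by_cases hab : a > b
      · refine ⟨a :: rest, by simp [pvPopFirst, hab], ?_⟩
        simp [min_operations_to_sort_alt, pvGoB, hab]
      · have hle : a ≤ b := not_lt.mp hab
        have hnp : ¬ List.Pairwise (· ≤ ·) (b :: rest) := by
          intro hp
          apply h
          rw [List.pairwise_cons] at hp
          rw [List.pairwise_cons]
          refine ⟨?_, List.pairwise_cons.mpr hp⟩
          intro x hx
          rcases List.mem_cons.mp hx with hx | hx
          · exact hx ▸ hle
          · exact hle.trans (hp.1 x hx)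
        obtain ⟨l', hl', hc⟩ := ih hnp
        obtain ⟨u, rfl⟩ := pvPopFirst_head b rest l' hl'
        refine ⟨a :: b :: u, ?_, ?_⟩
        · simp [pvPopFirst, hab, hl']
        · have h1 : pvGoB a (b :: rest) = pvGoB b rest := by
            simp [pvGoB, not_lt.mpr hle]
          have h2 : pvGoB a (b :: u) = pvGoB b u := by
            simp [pvGoB, not_lt.mpr hle]
          simp only [min_operations_to_sort_alt] at hc ⊢
          rw [h1, h2]
          exact hc

theorem pvLoopA_eq : ∀ (n : Nat) (xs : List Int) (count : Int), xs.length ≤ n →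
    pvLoopA xs count = count + min_operations_to_sort_alt xs := by
  intro n
  induction n with
  | zero =>
    intro xs count hlen
    have : xs = [] := List.length_eq_zero_iff.mp (Nat.le_zero.mp hlen)
    subst this
    rw [pvLoopA]
    simp [min_operations_to_sort_alt, PySem.List.sorted]
  | succ n ih =>
    intro xs count hlen
    rw [pvLoopA]
    by_cases hs : xs = PySem.List.sorted xs (fun x => x) false
    · rw [if_pos hs]
      have hp := (pv_sorted_iff xs).mp hs
      match xs with
      | [] => simp [min_operations_to_sort_alt]
      | a :: t =>
        rw [List.pairwise_cons] at hp
        simp [min_operations_to_sort_alt, pvGoB_sorted t a hp.1 hp.2]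
    · rw [if_neg hs]
      have hnp : ¬ List.Pairwise (· ≤ ·) xs := fun hp => hs ((pv_sorted_iff xs).mpr hp)
      obtain ⟨l, hl, hc⟩ := pv_pop_step xs hnp
      have hlt := pvPopFirst_length xs l hl
      split
      next arr' harr =>
        rw [hl] at harr
        cases harr
        rw [ih l (count + 1) (by omega), hc]
        ring
      next hnone =>
        rw [hl] at hnone
        cases hnone

-- ===== VERDICT (by name: the statement is the Claim_ definition above) =====
theorem min_operations_to_sort_spec : Claim_equal_min_operations_to_sort := by
  intro arr _
  unfold Spec_min_operations_to_sort min_operations_to_sort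
  rw [pvLoopA_eq arr.length arr 0 le_rfl]
  ring
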